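-- pv_equiv track=rewrite | github.com/MrJujek/agh | wdi/set1/task127.py | wiel
-- ===== SOURCE A (Python) =====
-- def wiel(napis):
--     d = len(napis)
--     flaga = True
--     for baza in range(1, d // 2 + 1):
--         if d % baza == 0:
--             flaga = True
--             for x in range(baza, d, baza):
--                 for z in range(baza):
--                     if napis[z + x] != napis[z]:
--                         flaga =  False
--         # end if
--         if flaga: return True
--     # end for
--     return False
-- ===== SOURCE B (Python) =====
-- def wiel(napis):
--     d = len(napis)
--     return any(d % b == 0 and napis[b:] == napis[:-b]
--                for b in range(1, d // 2 + 1))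
-- ===== Notes on version B (the rewrite author's own statement) =====
-- stated objective: simpler
-- what changed: The flag-threaded triple nested loop comparing every block to the first block is replaced by a single any() over the candidate periods, each tested with one shift comparison napis[b:] == napis[:-b] instead of the two inner index loops.
import Mathlib
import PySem

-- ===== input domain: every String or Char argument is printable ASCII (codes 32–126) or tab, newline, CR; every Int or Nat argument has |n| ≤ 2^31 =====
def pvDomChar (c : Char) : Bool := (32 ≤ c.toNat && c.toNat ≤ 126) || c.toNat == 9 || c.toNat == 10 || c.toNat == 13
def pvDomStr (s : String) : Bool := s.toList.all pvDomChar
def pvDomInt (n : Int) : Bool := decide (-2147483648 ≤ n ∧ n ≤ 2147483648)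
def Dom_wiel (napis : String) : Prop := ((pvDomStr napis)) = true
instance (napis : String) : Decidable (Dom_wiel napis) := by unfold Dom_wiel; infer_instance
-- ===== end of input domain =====

-- B replaces A's flag-threaded triple nested loop (compare every block with the first block)
-- by one any() over candidate periods, testing each with a single shift comparison s[b:] == s[:-b].

-- ===== PORT A =====
-- inner pair of loops of A, run after `flaga = True`: flaga ends up True iff every block equals block 0
def wielInner (cs : List Char) (d b : Int) : Bool :=
  (PySem.List.pyRange b d b).foldl (fun f x =>
    (PySem.List.pyRange 0 b 1).foldl (fun f2 z =>
      if PySem.List.pyGet? cs (z + x) ≠ PySem.List.pyGet? cs z then false else f2) f) true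

-- the `for baza in range(...)` loop of A with the threaded `flaga` and the early `return True`
def wielAux (cs : List Char) (d : Int) (flaga : Bool) : List Int → Bool
  | [] => false
  | baza :: rest =>
    let flaga' := if PySem.Int.mod d baza == 0 then wielInner cs d baza else flaga
    if flaga' then true else wielAux cs d flaga' rest

def wiel (napis : String) : Bool :=
  let cs := napis.toList
  let d : Int := (cs.length : Int)
  wielAux cs d true (PySem.List.pyRange 1 (PySem.Int.floordiv d 2 + 1) 1)

-- ===== PORT B =====
def wiel_alt (napis : String) : Bool :=
  let cs := napis.toList
  let d : Int := (cs.length : Int)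
  (PySem.List.pyRange 1 (PySem.Int.floordiv d 2 + 1) 1).any (fun b =>
    PySem.Int.mod d b == 0 &&
      (PySem.List.slice cs (some b) none == PySem.List.slice cs none (some (-b))))

-- ===== PRECONDITION & SPEC =====
def Spec_wiel (napis : String) (out : Bool) : Prop := out = wiel_alt napis
instance (napis : String) (out : Bool) : Decidable (Spec_wiel napis out) := by unfold Spec_wiel; infer_instance

-- ===== CLAIM (what is proved, stated in full; the proofs are below) =====
def Claim_equal_wiel : Prop := ∀ (napis : String), Dom_wiel napis → Spec_wiel napis (wiel napis)

-- ===== LEMMAS AND PROOFS =====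

-- a foldl that can only turn the flag off is `init && all`
theorem foldl_if_false {α : Type} (c : α → Prop) [DecidablePred c] :
    ∀ (l : List α) (init : Bool),
      l.foldl (fun f x => if c x then false else f) init = (init && l.all (fun x => !decide (c x))) := by
  intro l
  induction l with
  | nil => simp
  | cons a l ih =>
    intro init
    by_cases h : c a
    · rw [List.foldl_cons, if_pos h, ih]
      simp [h]
    · rw [List.foldl_cons, if_neg h, ih]
      simp [h]

theorem foldl_band {α : Type} (g : α → Bool) :
    ∀ (l : List α) (init : Bool),
      l.foldl (fun f x => f && g x) init = (init && l.all g) := by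
  intro l
  induction l with
  | nil => simp
  | cons a l ih => intro init; simp [List.foldl_cons, ih, Bool.and_assoc]

theorem wielInner_eq (cs : List Char) (d b : Int) :
    wielInner cs d b =
      (PySem.List.pyRange b d b).all (fun x =>
        (PySem.List.pyRange 0 b 1).all (fun z =>
          decide (PySem.List.pyGet? cs (z + x) = PySem.List.pyGet? cs z))) := by
  unfold wielInner
  have hbody : (fun (f : Bool) (x : Int) =>
      (PySem.List.pyRange 0 b 1).foldl (fun f2 z =>
        if PySem.List.pyGet? cs (z + x) ≠ PySem.List.pyGet? cs z then false else f2) f)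
      = fun (f : Bool) (x : Int) => f && (PySem.List.pyRange 0 b 1).all (fun z =>
          decide (PySem.List.pyGet? cs (z + x) = PySem.List.pyGet? cs z)) := by
    funext f x
    rw [foldl_if_false (fun z => PySem.List.pyGet? cs (z + x) ≠ PySem.List.pyGet? cs z)]
    congr 1
    apply List.all_congr rfl
    intro z
    by_cases h : PySem.List.pyGet? cs (z + x) = PySem.List.pyGet? cs z <;> simp [h]
  rw [hbody, foldl_band]
  simp

-- A's loop starting from a dead flag is an `any`
theorem wielAux_false (cs : List Char) (d : Int) :
    ∀ (bs : List Int),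
      wielAux cs d false bs =
        bs.any (fun b => PySem.Int.mod d b == 0 && wielInner cs d b) := by
  intro bs
  induction bs with
  | nil => simp [wielAux]
  | cons b rest ih =>
    by_cases h : PySem.Int.mod d b == 0
    · cases hw : wielInner cs d b <;> simp [wielAux, h, hw, ih]
    · simp [wielAux, h] at *
      simp [ih]

theorem wielAux_cons_dvd (cs : List Char) (d b : Int) (rest : List Int)
    (h : PySem.Int.mod d b == 0) :
    wielAux cs d true (b :: rest) =
      (b :: rest).any (fun b => PySem.Int.mod d b == 0 && wielInner cs d b) := by
  cases hw : wielInner cs d b <;>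
    simp [wielAux, h, hw, wielAux_false]

-- the core combinatorial fact: for a divisor k of n with 2*k ≤ n, "every block equals
-- block 0" (A's check) is exactly "cs shifted by k equals cs" (B's check)
theorem block_iff_shift (cs : List Char) (k : Nat) (hk : 1 ≤ k)
    (hdvd : k ∣ cs.length) (h2 : 2 * k ≤ cs.length) :
    ((PySem.List.pyRange (k : Int) (cs.length : Int) (k : Int)).all (fun x =>
        (PySem.List.pyRange 0 (k : Int) 1).all (fun z =>
          decide (PySem.List.pyGet? cs (z + x) = PySem.List.pyGet? cs z))))
      = (cs.drop k == cs.take (cs.length - k)) := by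
  set n := cs.length with hn
  have hkpos : (0 : Int) < (k : Int) := by exact_mod_cast hk
  -- the Prop behind A's double `all`
  have hA : (((PySem.List.pyRange (k : Int) (n : Int) (k : Int)).all (fun x =>
        (PySem.List.pyRange 0 (k : Int) 1).all (fun z =>
          decide (PySem.List.pyGet? cs (z + x) = PySem.List.pyGet? cs z)))) = true)
      ↔ (∀ q z : Nat, 1 ≤ q → k * q < n → z < k → cs[z + k * q]? = cs[z]?) := by
    simp only [List.all_eq_true, decide_eq_true_eq]
    constructor
    · intro h q z hq hqn hz
      have hx := h (k * q : Nat) (by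
        rw [PySem.List.mem_pyRange_iff_of_pos hkpos]
        refine ⟨by push_cast; nlinarith, by exact_mod_cast hqn, ⟨(q : Int) - 1, by push_cast; ring⟩⟩)
      have hz' := hx (z : Nat) (by
        rw [PySem.List.mem_pyRange_iff_of_pos one_pos]
        exact ⟨by positivity, by exact_mod_cast hz, ⟨(z : Int), by ring⟩⟩)
      have : ((z + k * q : Nat) : Int) = (z : Int) + (k * q : Nat) := by push_cast; ring
      rwa [← this, PySem.List.pyGet?_natCast, PySem.List.pyGet?_natCast] at hz'
    · intro h x hx z hz
      rw [PySem.List.mem_pyRange_iff_of_pos hkpos] at hx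
      rw [PySem.List.mem_pyRange_iff_of_pos one_pos] at hz
      obtain ⟨hx1, hx2, c, hc⟩ := hx
      obtain ⟨hz1, hz2, -⟩ := hz
      have hx0 : 0 ≤ x := le_trans (le_of_lt hkpos) hx1
      have hz0 : 0 ≤ z := hz1
      have hq : x = (k : Int) * (c + 1) := by linarith [hc]
      have hc0 : 0 ≤ c := by nlinarith
      have hxn : x = ((k * (c.toNat + 1) : Nat) : Int) := by
        push_cast; rw [Int.toNat_of_nonneg hc0]; linarith [hq]
      have hzn : z = ((z.toNat : Nat) : Int) := (Int.toNat_of_nonneg hz0).symm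
      have key := h (c.toNat + 1) z.toNat (by omega)
        (by
          have : ((k * (c.toNat + 1) : Nat) : Int) < (n : Int) := by rw [← hxn]; exact hx2
          exact_mod_cast this)
        (by
          have : (z.toNat : Int) < (k : Int) := by rw [← hzn]; exact hz2
          exact_mod_cast this)
      have : z + x = ((z.toNat + k * (c.toNat + 1) : Nat) : Int) := by
        rw [hzn, hxn]; push_cast; simp
      rw [this, hzn, PySem.List.pyGet?_natCast, PySem.List.pyGet?_natCast]
      exact key
  -- the Prop behind B's slice equality
  have hB : (cs.drop k = cs.take (n - k)) ↔ (∀ i : Nat, i < n - k → cs[k + i]? = cs[i]?) := by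
    constructor
    · intro h i hi
      have := congrArg (fun l => l[i]?) h
      simpa [List.getElem?_drop, List.getElem?_take, hi] using this
    · intro h
      apply List.ext_getElem?
      intro i
      rw [List.getElem?_drop, List.getElem?_take]
      by_cases hi : i < n - k
      · simp [hi, h i hi]
      · have h1 : cs[k + i]? = none := by
          apply List.getElem?_eq_none; omega
        simp [hi, h1]
  -- the two Props are equivalent
  have hmain : (∀ q z : Nat, 1 ≤ q → k * q < n → z < k → cs[z + k * q]? = cs[z]?)
      ↔ (∀ i : Nat, i < n - k → cs[k + i]? = cs[i]?) := by
    constructor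
    · intro h i hi
      -- decompose i = z + k*q
      obtain ⟨z, q, hz, hiq⟩ : ∃ z q : Nat, z < k ∧ i = z + k * q :=
        ⟨i % k, i / k, Nat.mod_lt _ (by omega), by rw [Nat.mod_add_div]⟩
      have hstep : cs[k + i]? = cs[z]? := by
        have : k + i = z + k * (q + 1) := by rw [hiq]; ring
        rw [this]
        exact h (q + 1) z (by omega) (by omega) hz
      have hbase : cs[i]? = cs[z]? := by
        rcases Nat.eq_zero_or_pos q with hq0 | hq1
        · simp [hiq, hq0]
        · rw [hiq]; exact h q z hq1 (by omega) hz
      rw [hstep, hbase]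
    · intro h q z hq hqn hz
      -- chain the shift property q times; divisibility keeps indices below n - k
      obtain ⟨m, hm⟩ := hdvd
      induction q with
      | zero => omega
      | succ q ih =>
        have hm1 : q + 1 < m := Nat.lt_of_mul_lt_mul_left (a := k) (by rw [← hm]; exact hqn)
        have key : k * q + 2 * k ≤ n := by
          have h2' : k * (q + 2) ≤ k * m := Nat.mul_le_mul_left _ (by omega)
          calc k * q + 2 * k = k * (q + 2) := by ring
            _ ≤ k * m := h2'
            _ = n := hm.symm
        have hlt : z + k * q < n - k := by omega
        have hshift : cs[z + k * q + k]? = cs[z + k * q]? := by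
          have := h (z + k * q) hlt
          rwa [Nat.add_comm k (z + k * q)] at this
        have heq : z + k * (q + 1) = z + k * q + k := by ring
        rw [heq, hshift]
        rcases Nat.eq_zero_or_pos q with hq0 | hq1
        · simp [hq0]
        · exact ih hq1 (by omega)
  rw [Bool.eq_iff_iff, hA, beq_iff_eq]
  exact hmain.trans hB.symm

-- pointwise agreement of the two per-candidate tests on the range
theorem body_eq (cs : List Char) (b : Int) (hb1 : 1 ≤ b)
    (hb2 : 2 * b ≤ (cs.length : Int)) :
    (PySem.Int.mod (cs.length : Int) b == 0 && wielInner cs (cs.length : Int) b)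
      = (PySem.Int.mod (cs.length : Int) b == 0 &&
          (PySem.List.slice cs (some b) none == PySem.List.slice cs none (some (-b)))) := by
  by_cases hd : PySem.Int.mod (cs.length : Int) b = 0
  · have hdvd : (b : Int) ∣ (cs.length : Int) := (PySem.Int.mod_eq_zero_iff_dvd _ _).mp hd
    set k : Nat := b.toNat with hk
    have hbk : b = (k : Int) := (Int.toNat_of_nonneg (by omega)).symm
    have hk1 : 1 ≤ k := by omega
    have hdvdn : k ∣ cs.length := by
      rw [hbk] at hdvd; exact_mod_cast hdvd
    have h2k : 2 * k ≤ cs.length := by omega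
    have hs1 : PySem.List.slice cs (some b) none = cs.drop k := by
      rw [PySem.List.slice_from cs (by omega : (0:Int) ≤ b)]
    have hs2 : PySem.List.slice cs none (some (-b)) = cs.take (cs.length - k) := by
      rw [hbk]; exact PySem.List.slice_to_neg_natCast cs k hk1
    rw [hs1, hs2, wielInner_eq, hbk, block_iff_shift cs k hk1 hdvdn h2k]
  · have hfalse : (PySem.Int.mod (cs.length : Int) b == 0) = false := beq_eq_false_iff_ne.mpr hd
    rw [hfalse, Bool.false_and, Bool.false_and]

theorem any_congr_mem {α : Type} (l : List α) (f g : α → Bool)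
    (h : ∀ x ∈ l, f x = g x) : l.any f = l.any g := by
  induction l with
  | nil => rfl
  | cons a l ih =>
    simp only [List.any_cons]
    rw [h a (List.mem_cons_self), ih (fun x hx => h x (List.mem_cons_of_mem a hx))]

-- ===== VERDICT (by name: the statement is the Claim_ definition above) =====
theorem wiel_spec : Claim_equal_wiel := by
  intro napis _
  unfold Spec_wiel wiel wiel_alt
  set cs := napis.toList with hcs
  set d : Int := (cs.length : Int) with hd
  have hd0 : 0 ≤ d := by positivity
  have hfd : PySem.Int.floordiv d 2 = d / 2 := by
    unfold PySem.Int.floordiv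
    rw [Int.fdiv_eq_ediv]
    simp
  have hany : wielAux cs d true (PySem.List.pyRange 1 (PySem.Int.floordiv d 2 + 1) 1)
      = (PySem.List.pyRange 1 (PySem.Int.floordiv d 2 + 1) 1).any
          (fun b => PySem.Int.mod d b == 0 && wielInner cs d b) := by
    rcases le_or_gt (PySem.Int.floordiv d 2 + 1) 1 with hle | hgt
    · rw [PySem.List.pyRange_one_eq_nil hle]; rfl
    · rw [PySem.List.pyRange_one_cons hgt]
      apply wielAux_cons_dvd
      simp [PySem.Int.mod, Int.fmod_one]
  rw [hany]
  apply any_congr_mem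
  intro b hb
  rw [PySem.List.mem_pyRange_one] at hb
  have hb2 : 2 * b ≤ d := by
    have := hb.2
    rw [hfd] at this
    omega
  exact body_eq cs b hb.1 hb2
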